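-- pv_equiv track=rewrite | github.com/daniel-reich/ubiquitous-fiesta | jecvfH5eyGLrSwzNh_14.py | fauna_number
-- ===== SOURCE A (Python) =====
-- def fauna_number(txt):
--   animals = sorted(["muggercrocodile", "one-hornedrhino", "python", "moth", "monitorlizard", "bengaltiger"])
--   txt = txt.replace(',',' ').split()
--   ret = []
--   for i in animals:
--     if i in txt:
--       ret.append((i,txt[txt.index(i)-1]))
--   return ret
-- ===== SOURCE B (Python) =====
-- def fauna_number(txt):
--   animal_set = {"muggercrocodile", "one-hornedrhino", "python", "moth", "monitorlizard", "bengaltiger"}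
--   words = txt.replace(',', ' ').split()
--   found = {}
--   for i, w in enumerate(words):
--     if w in animal_set and w not in found:
--       found[w] = words[i - 1]
--   return sorted(found.items(), key=lambda kv: kv[0])
-- ===== Notes on version B (the rewrite author's own statement) =====
-- stated objective: alternative
-- what changed: Instead of scanning the word list twice per animal (membership test plus .index), B makes a single enumerate pass over the words recording each animal's first preceding word in a dict, then sorts the found items by animal name.
import Mathlib
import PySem

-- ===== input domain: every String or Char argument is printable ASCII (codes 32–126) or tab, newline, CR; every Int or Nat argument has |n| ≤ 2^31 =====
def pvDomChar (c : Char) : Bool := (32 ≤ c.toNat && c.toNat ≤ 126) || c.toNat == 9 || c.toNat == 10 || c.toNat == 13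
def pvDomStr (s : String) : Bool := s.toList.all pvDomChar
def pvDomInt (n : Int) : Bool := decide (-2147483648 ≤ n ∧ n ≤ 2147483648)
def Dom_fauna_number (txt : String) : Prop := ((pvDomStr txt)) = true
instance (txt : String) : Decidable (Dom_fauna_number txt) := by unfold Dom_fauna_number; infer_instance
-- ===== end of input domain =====

-- B replaces A's six membership/index scans of the word list (one pair per animal) by a single
-- pass over the words that records each animal's first preceding word in a dict, then sorts the items.

-- ===== PORT A =====
-- Python's txt[txt.index(i)-1] never raises (index-1 ≥ -1 and the list is nonempty when i ∈ txt),
-- so the `.getD ""` default below is never reached; same for the one in port B.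
def fauna_number (txt : String) : List (String × String) :=
  let animals := PySem.List.sorted ["muggercrocodile", "one-hornedrhino", "python", "moth", "monitorlizard", "bengaltiger"] (fun x => x) false
  let ws := PySem.Str.split₀ (PySem.Str.replace txt "," " ")
  animals.foldl (fun ret i =>
    if ws.contains i then
      ret ++ [(i, (PySem.List.pyGet? ws ((((PySem.List.index? ws i).getD 0 : Nat) : Int) - 1)).getD "")]
    else ret) []

-- ===== PORT B =====
def pvAnimalSet : List String :=
  PySem.Set.ofList ["muggercrocodile", "one-hornedrhino", "python", "moth", "monitorlizard", "bengaltiger"]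

def fauna_number_alt (txt : String) : List (String × String) :=
  let ws := PySem.Str.split₀ (PySem.Str.replace txt "," " ")
  let found := (PySem.List.enumerate ws 0).foldl
    (fun d p =>
      if pvAnimalSet.contains p.2 && !(d.contains p.2) then
        d.insert p.2 ((PySem.List.pyGet? ws (p.1 - 1)).getD "")
      else d)
    PySem.Dict.empty
  PySem.List.sorted found.items (fun kv => kv.1) false

-- ===== PRECONDITION & SPEC =====
def Spec_fauna_number (txt : String) (out : List (String × String)) : Prop := out = fauna_number_alt txt
instance (txt : String) (out : List (String × String)) : Decidable (Spec_fauna_number txt out) := by unfold Spec_fauna_number; infer_instance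

-- ===== CLAIM (what is proved, stated in full; the proofs are below) =====
def Claim_equal_fauna_number : Prop := ∀ (txt : String), Dom_fauna_number txt → Spec_fauna_number txt (fauna_number txt)

-- ===== LEMMAS AND PROOFS =====

-- the final lookup of B's one-pass loop, generically in the value function g
theorem pvLoopGet (AS : List String) (g : Int → String) :
    ∀ (l : List String) (s : Int) (d : PySem.Dict String String) (a : String),
    ((PySem.List.enumerate l s).foldl
      (fun d p => if AS.contains p.2 && !(d.contains p.2) then d.insert p.2 (g p.1) else d) d).get? a =
    if d.contains a then d.get? a
    else if AS.contains a then Option.map (fun k : Nat => g (s + (k : Int))) (PySem.List.index? l a) else none := by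
  intro l
  induction l with
  | nil =>
    intro s d a
    simp [PySem.List.enumerate_nil]
    exact fun h => (PySem.Dict.get?_eq_none_iff_contains d a).2 h
  | cons x l ih =>
    intro s d a
    rw [PySem.List.enumerate_cons, List.foldl_cons]
    by_cases hg : (AS.contains x && !(d.contains x)) = true
    · simp only [hg, if_pos]
      rw [ih]
      obtain ⟨hAS, hdx⟩ := Bool.and_eq_true_iff.1 hg
      simp only [Bool.not_eq_true'] at hdx
      by_cases hax : a = x
      · subst hax
        rw [PySem.Dict.contains_insert_self, PySem.Dict.get?_insert_self,
          PySem.List.index?_cons_self, hdx, hAS]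
        simp
      · rw [PySem.Dict.contains_insert, PySem.Dict.get?_insert_of_ne _ _ hax,
          PySem.List.index?_cons_of_ne _ (fun h => hax h.symm)]
        have hbeq : (a == x) = false := by simpa using hax
        rw [hbeq]
        simp only [Bool.false_or]
        by_cases hda : d.contains a = true
        · simp [hda]
        · simp only [hda, if_neg Bool.false_ne_true]
          by_cases hASa : AS.contains a = true
          · simp only [hASa, if_pos]
            cases PySem.List.index? l a with
            | none => simp
            | some k =>
              have h : s + 1 + (k : Int) = s + ((k + 1 : Nat) : Int) := by push_cast; ring
              simp [h]
          · simp only [hASa]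
            rfl
    · simp only [Bool.not_eq_true] at hg
      simp only [hg, if_neg Bool.false_ne_true]
      rw [ih]
      by_cases hda : d.contains a = true
      · simp [hda]
      · simp only [hda, if_neg Bool.false_ne_true]
        by_cases hASa : AS.contains a = true
        · simp only [hASa, if_pos]
          by_cases hax : a = x
          · subst hax
            have hda' : d.contains a = false := by simpa using hda
            rw [hda', hASa] at hg
            simp at hg
          · rw [PySem.List.index?_cons_of_ne _ (fun h => hax h.symm)]
            cases PySem.List.index? l a with
            | none => simp
            | some k =>
              have h : s + 1 + (k : Int) = s + ((k + 1 : Nat) : Int) := by push_cast; ring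
              simp [h]
        · simp only [hASa]
          rfl

-- B's loop keeps the dict's keys without duplicates
theorem pvLoopNodup (AS : List String) (g : Int → String) :
    ∀ (L : List (Int × String)) (d : PySem.Dict String String), d.keys.Nodup →
    (L.foldl (fun d p => if AS.contains p.2 && !(d.contains p.2) then d.insert p.2 (g p.1) else d) d).keys.Nodup := by
  intro L
  induction L with
  | nil => intro d h; simpa
  | cons p L ih =>
    intro d h
    rw [List.foldl_cons]
    apply ih
    split
    · exact PySem.Dict.nodup_keys_insert _ _ _ h
    · exact h

theorem pvMemItemsIff (d : PySem.Dict String String) (hnd : d.keys.Nodup) (a v : String) :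
    (a, v) ∈ d.items ↔ d.get? a = some v := by
  constructor
  · exact fun h => PySem.Dict.get?_of_mem_items d h hnd
  · intro h
    rw [PySem.Dict.items_eq_map_keys d hnd ""]
    refine List.mem_map.2 ⟨a, ?_, ?_⟩
    · refine (PySem.Dict.contains_iff_mem_keys d a).1 ?_
      by_contra hc
      have : d.get? a = none := (PySem.Dict.get?_eq_none_iff_contains d a).2 (by simpa using hc)
      rw [this] at h
      simp at h
    · show (a, (d.get? a).getD "") = (a, v)
      rw [h]
      rfl

theorem pvPairwise6 :
    List.Pairwise (fun a b : String => a < b)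
      ["bengaltiger", "monitorlizard", "moth", "muggercrocodile", "one-hornedrhino", "python"] := by
  have h : List.Pairwise (fun a b : String => a.toList < b.toList)
      ["bengaltiger", "monitorlizard", "moth", "muggercrocodile", "one-hornedrhino", "python"] := by decide
  exact h.imp (fun hab => String.lt_iff_toList_lt.2 hab)

theorem pvSortedAnimals :
    PySem.List.sorted ["muggercrocodile", "one-hornedrhino", "python", "moth", "monitorlizard", "bengaltiger"] (fun x => x) false =
      ["bengaltiger", "monitorlizard", "moth", "muggercrocodile", "one-hornedrhino", "python"] := by
  apply PySem.List.sorted_eq_of_perm_of_pairwise_lt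
  · decide
  · exact pvPairwise6

theorem pvMemAnimalSet (a : String) :
    pvAnimalSet.contains a = true ↔ a ∈ (["bengaltiger", "monitorlizard", "moth", "muggercrocodile", "one-hornedrhino", "python"] : List String) := by
  rw [List.contains_iff_mem, pvAnimalSet, PySem.Set.mem_ofList]
  simp only [List.mem_cons, List.not_mem_nil]
  tauto

-- ===== VERDICT (by name: the statement is the Claim_ definition above) =====
set_option maxHeartbeats 1000000 in
theorem fauna_number_spec : Claim_equal_fauna_number := by
  unfold Claim_equal_fauna_number Spec_fauna_number
  intro txt _
  unfold fauna_number fauna_number_alt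
  set ws := PySem.Str.split₀ (PySem.Str.replace txt "," " ") with hws
  set g : Int → String := fun i => (PySem.List.pyGet? ws (i - 1)).getD "" with hg
  set found := (PySem.List.enumerate ws 0).foldl
    (fun d p => if pvAnimalSet.contains p.2 && !(d.contains p.2) then d.insert p.2 (g p.1) else d)
    PySem.Dict.empty with hfound
  rw [pvSortedAnimals, PySem.List.foldl_append_if]
  set L := List.map (fun i => (i, (PySem.List.pyGet? ws ((((PySem.List.index? ws i).getD 0 : Nat) : Int) - 1)).getD ""))
    (List.filter (fun i => ws.contains i) ["bengaltiger", "monitorlizard", "moth", "muggercrocodile", "one-hornedrhino", "python"]) with hL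
  have hnodkeys : found.keys.Nodup := pvLoopNodup _ _ _ _ (by simp)
  have hget : ∀ a, found.get? a =
      if pvAnimalSet.contains a then Option.map (fun k : Nat => g ((k : Int))) (PySem.List.index? ws a) else none := by
    intro a
    rw [hfound, pvLoopGet]
    simp [PySem.Dict.contains_empty]
  have hpairL : L.Pairwise (fun p q => p.1 < q.1) := by
    rw [hL]
    rw [List.pairwise_map]
    apply List.Pairwise.filter
    exact pvPairwise6
  have hnodL : L.Nodup := (hpairL.imp (fun {p q} h => by intro he; rw [he] at h; exact lt_irrefl _ h))
  have hnodI : found.items.Nodup := by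
    rw [PySem.Dict.items_eq_map_keys found hnodkeys ""]
    exact hnodkeys.map (fun a b h => congrArg Prod.fst h)
  have hperm : L.Perm found.items := by
    rw [List.perm_ext_iff_of_nodup hnodL hnodI]
    rintro ⟨a, v⟩
    rw [pvMemItemsIff found hnodkeys a v, hget a]
    constructor
    · intro hmem
      rw [hL] at hmem
      obtain ⟨b, hb, hbe⟩ := List.mem_map.1 hmem
      obtain ⟨hb6, hbws⟩ := List.mem_filter.1 hb
      injection hbe with h1 h2
      subst h1
      subst h2
      rw [if_pos ((pvMemAnimalSet b).2 hb6)]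
      have hmemws : b ∈ ws := by simpa using hbws
      obtain ⟨k, hk⟩ := Option.isSome_iff_exists.1 ((PySem.List.index?_isSome_iff ws b).2 hmemws)
      rw [hk]
      simp [hg]
    · intro hsome
      by_cases hA : pvAnimalSet.contains a = true
      · rw [if_pos hA] at hsome
        cases hidx : PySem.List.index? ws a with
        | none => rw [hidx] at hsome; simp at hsome
        | some k =>
          rw [hidx] at hsome
          have hv : g ((k : Int)) = v := by simpa using hsome
          have hmemws : a ∈ ws := (PySem.List.index?_isSome_iff ws a).1 (by rw [hidx]; rfl)
          rw [hL]
          refine List.mem_map.2 ⟨a, List.mem_filter.2 ⟨(pvMemAnimalSet a).1 hA, by simpa using hmemws⟩, ?_⟩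
          rw [hidx]
          simp only [Option.getD_some]
          rw [← hv, hg]
      · rw [if_neg hA] at hsome
        simp at hsome
  rw [List.nil_append]
  exact (PySem.List.sorted_eq_of_perm_of_pairwise_lt found.items L _ hperm hpairL).symm
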